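-- pv_equiv track=rewrite | github.com/delsinz/knn-classifier | knn.py | assign_class_label
-- ===== SOURCE A (Python) =====
-- def assign_class_label(to_be_predicted, abalone):
--     '''
--     Assigns labels based on numbers of rings and the value
--     of abalone supplied
--     '''
--     class_labels = []
--
--     # For abalone 3
--     if abalone == 3:
--         for rings in to_be_predicted:
--             label = ''
--             if rings <= 8:
--                 label = 'very-young'
--             elif rings <= 10:
--                 label = 'middle-age'
--             else:
--                 label = 'old'
--             class_labels.append(label)
--
--     # For abalone 2
--     elif abalone == 2:
--         for rings in to_be_predicted:
--             label = ''
--             if rings <= 10: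
--                 label = 'young'
--             else:
--                 label = 'old'
--             class_labels.append(label)
--
--     return class_labels
-- ===== SOURCE B (Python) =====
-- # Staged refinement: start with every label 'old', then run one whole-list
-- # overwrite pass per threshold (decreasing), relabelling entries at or below it.
-- def assign_class_label(to_be_predicted, abalone):
--     if abalone == 3:
--         stages = [(10, 'middle-age'), (8, 'very-young')]
--     elif abalone == 2:
--         stages = [(10, 'young')]
--     else:
--         return []
--     labels = ['old'] * len(to_be_predicted)
--     for threshold, name in stages:
--         labels = [name if rings <= threshold else lab
--                   for rings, lab in zip(to_be_predicted, labels)]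
--     return labels
-- ===== Notes on version B (the rewrite author's own statement) =====
-- stated objective: alternative
-- what changed: Replaces the per-element comparison cascade by staged whole-list refinement: the result starts as a list of 'old' labels and one overwrite pass per threshold (in decreasing order) relabels entries at or below that threshold.
import Mathlib
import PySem

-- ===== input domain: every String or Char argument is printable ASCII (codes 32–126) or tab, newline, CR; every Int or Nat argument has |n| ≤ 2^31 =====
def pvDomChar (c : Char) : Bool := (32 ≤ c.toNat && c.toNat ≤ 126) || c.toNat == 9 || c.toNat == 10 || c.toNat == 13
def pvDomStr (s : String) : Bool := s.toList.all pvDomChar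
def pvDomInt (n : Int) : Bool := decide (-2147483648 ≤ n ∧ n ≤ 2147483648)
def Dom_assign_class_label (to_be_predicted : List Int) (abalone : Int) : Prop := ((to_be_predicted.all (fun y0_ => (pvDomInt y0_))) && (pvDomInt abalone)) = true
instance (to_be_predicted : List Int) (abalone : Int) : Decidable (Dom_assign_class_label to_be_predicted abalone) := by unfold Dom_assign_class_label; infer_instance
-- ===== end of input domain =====

-- B builds the list of labels by staged whole-list refinement passes (all-'old' seed, one overwrite pass per threshold) instead of A's per-element comparison cascade; same cost, alternative structure.
-- ===== PORT A =====
def assign_class_label (to_be_predicted : List Int) (abalone : Int) : List String :=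
  if abalone = 3 then
    to_be_predicted.foldl (fun class_labels rings =>
      class_labels ++ [if rings ≤ 8 then "very-young"
                       else if rings ≤ 10 then "middle-age"
                       else "old"]) []
  else if abalone = 2 then
    to_be_predicted.foldl (fun class_labels rings =>
      class_labels ++ [if rings ≤ 10 then "young" else "old"]) []
  else []

-- ===== PORT B =====
-- stages per abalone, decreasing thresholds
def pvStages (abalone : Int) : Option (List (Int × String)) :=
  if abalone = 3 then some [(10, "middle-age"), (8, "very-young")]
  else if abalone = 2 then some [(10, "young")]
  else none

def assign_class_label_alt (to_be_predicted : List Int) (abalone : Int) : List String :=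
  match pvStages abalone with
  | none => []
  | some stages =>
      stages.foldl (fun labels st =>
        (to_be_predicted.zip labels).map (fun p => if p.1 ≤ st.1 then st.2 else p.2))
        (List.replicate to_be_predicted.length "old")

-- ===== PRECONDITION & SPEC =====
def Spec_assign_class_label (to_be_predicted : List Int) (abalone : Int) (out : List String) : Prop := out = assign_class_label_alt to_be_predicted abalone
instance (to_be_predicted : List Int) (abalone : Int) (out : List String) : Decidable (Spec_assign_class_label to_be_predicted abalone out) := by unfold Spec_assign_class_label; infer_instance

-- ===== CLAIM (what is proved, stated in full; the proofs are below) =====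
def Claim_equal_assign_class_label : Prop := ∀ (to_be_predicted : List Int) (abalone : Int), Dom_assign_class_label to_be_predicted abalone → Spec_assign_class_label to_be_predicted abalone (assign_class_label to_be_predicted abalone)

-- ===== LEMMAS AND PROOFS =====
-- a refinement pass over a list zipped with a pointwise function of itself is a pointwise map
theorem pv_zip_map_self (xs : List Int) (f : Int → String) (g : Int × String → String) :
    ((xs.zip (xs.map f)).map g) = xs.map (fun r => g (r, f r)) := by
  induction xs with
  | nil => rfl
  | cons x xs ih => simp [ih]

-- ===== VERDICT (by name: the statement is the Claim_ definition above) =====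
theorem assign_class_label_spec : Claim_equal_assign_class_label := by
  intro tbp ab _
  unfold Spec_assign_class_label assign_class_label assign_class_label_alt pvStages
  by_cases h3 : ab = 3
  · simp only [h3, reduceIte, PySem.List.foldl_append_singleton_eq_map, List.foldl_cons,
      List.foldl_nil, ← List.map_const', pv_zip_map_self]
    refine List.map_congr_left (fun rings _ => ?_)
    by_cases h8 : rings ≤ 8 <;> by_cases h10 : rings ≤ 10 <;> simp_all
  · by_cases h2 : ab = 2
    · subst h2
      simp only [show ((2:Int) = 3) ↔ False from by decide, ite_false, ite_true,
        List.nil_append, PySem.List.foldl_append_singleton_eq_map, List.foldl_cons,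
        List.foldl_nil, ← List.map_const', pv_zip_map_self]
    · simp [h3, h2]
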